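/- GENERATED by tools/from_farm_form.py from prooffarm-gif/accepted/GifMakeMapObject.2/Lemmas.lean (a worked proof of the farm's unit `GifMakeMapObject.2`,
   accepted by the verdict) — do not edit. -/
import Gif.Spec.Units.GifMakeMapObject_2
import Gif.Spec.HeapCarry

/-!
  Lemmas for the unit `GifMakeMapObject.2` (0x10793b … 0x1079a7, 30 instructions; gifalloc.c:57-72): A CLIENT OF THE HEAP with every
  failure state, proved from the contracts of `calloc`, `memcpy`, `free` and the three small check routines alone.
  `H` is the heap at the function's entry, `H.push 24 (r16 24)` the heap with the `ColorMapObject` (segment 1), `e` the state at the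
  function's entry, `v` the state at the cut.

  Part 1 (pure, no machine steps): where the next object is after a push; a live range of the old heap lies below every object
  allocated later; a callee's footprint "its stack frame and bytes of one live object" keeps the heap's invariant; the two bit facts.

  Part 2: the walk, one lemma per returned callee state (Proof.lean chains them; the ghost heap decides which one applies):

      mm2_seg_calloc   0x10793b → ret3             `calloc(count, 3)`: BOTH outcomes of `AllocPost` in the assertion `Mm2Ret3`
      mm2_seg_fail     ret3 → 0x1079ac (no room)   the checked store of NULL, `free(Object)`: `Done` with `(H.push 24 32).release H.next`
      mm2_seg_fill     ret3 → 0x1079ac (room)      the four checked stores, `memcpy` unless `ColorMap == NULL`: `Done` with both objects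
-/

open X86 X86.User Asan ProgX.Base ProgX.Base.Spec Gif.Spec

set_option maxRecDepth 4000
set_option maxHeartbeats 4000000

namespace Gif.Spec.GifMakeMapObject_2

/-! ### Part 1: pure facts about the heap -/

/-- **Where the next object of a heap with one more object is**: `64 + c` bytes further (the chunk of the pushed object: its capacity and two
red zones). `omega` does not look into `H.next`: this is the rewrite rule. -/
theorem mm2_next_push (H : Heap) (n c : Nat) : (H.push n c).next = H.next + 64 + c := by
  rw [Heap.next_def, Heap.next_def, Heap.push_base, Heap.push_used]
  omega

/-- **The heap had room for the object it has**: the invariant of `H.push n c` says the chunk of the new object ends inside the region. -/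
theorem mm2_fits_of_push {H : Heap} {n c : Nat} {mem : Mem} (h : HeapOK (H.push n c) mem) : H.Fits c := by
  have hroom := h.room
  rw [Heap.push_base, Heap.push_used, Heap.push_limit] at hroom
  unfold Heap.Fits
  omega

/-- **Where a fitting object ends**: its chunk (capacity and right red zone) ends inside the region. -/
theorem mm2_fits_next {H : Heap} {c : Nat} (h : H.Fits c) : H.next + c + 32 ≤ H.limit := by
  unfold Heap.Fits at h
  rw [Heap.next_def]
  omega

/-- **A live range of the heap `H` ends at or below the next object, or lies beyond the heap's region**: it lies in a live heap
object (below the next one: `HeapOK.next_above`), in one of the other live objects, or in a stack object (both outside the region: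
`HeapInv.restOut`, `HeapInv.stackObj_out`). So it does not meet ANY object allocated later. -/
theorem mm2_live_below_next {H : Heap} {rest : List Obj} {frames : List (Nat × FrameLayout)} {top : Nat} {mem : Mem} {a k : Nat}
    (h : LiveIn (H.liveObjs ++ rest) frames a k) (hinv : HeapInv H rest frames top mem) :
    a + k ≤ H.next ∨ H.limit ≤ a := by
  have hroom := hinv.heap.room
  obtain ⟨o, ho, k1, k2⟩ := h
  rcases List.mem_append.mp ho with hs | hoth
  · -- a stack object
    rcases hinv.stackObj_out hs with hlo | hhi
    · left
      rw [Heap.next_def]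
      omega
    · right
      omega
  · rcases List.mem_append.mp hoth with hheap | hr
    · -- a live heap object
      obtain ⟨o', ho', _, e⟩ := Heap.mem_liveObjs.mp hheap
      have hab := hinv.heap.next_above ho'
      have hsc := hinv.heap.size_le_cap ho'
      have e1 : o.base = o'.base := by
        rw [← e]
        rfl
      have e2 : o.size = o'.size := by
        rw [← e]
        rfl
      left
      omega
    · -- one of the other live objects
      rcases hinv.restOut o hr with hlo | hhi
      · left
        rw [Heap.next_def]
        omega
      · right
        omega

/-- **A callee that wrote its stack frame and bytes of ONE live object keeps the heap's invariant** (`memcpy` / `memset` into a live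
object): no shadow byte written; the footprint is `F` bytes of stack below `sp ≤ 800000H` and `[a, a + m)` inside the live object
`(p, n)`. -/
theorem mm2_callee_into_live {H : Heap} {rest : List Obj} {frames : List (Nat × FrameLayout)} {top : Nat} {mem mem' : Mem}
    {p n a m sp F : Nat} (h : HeapInv H rest frames top mem) (hbase : H.base = 0x800000) (hun : ShadowUntouched mem mem')
    (hsp : sp ≤ 0x800000) (hl : H.Live p n) (h1 : p ≤ a) (h2 : a + m ≤ p + n)
    (hs : Mem.SameExcept [⟨sp - F, sp⟩, ⟨a, a + m⟩] mem mem') :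
    HeapInv H rest frames top mem' := by
  obtain ⟨c, hlc⟩ := hl
  have hsc := h.heap.size_le_cap hlc
  simp only at hsc
  refine h.sameExcept hun hs ?_
  intro w hw
  rcases List.mem_cons.mp hw with rfl | hw
  · -- the stack window lies below the heap's region
    left
    left
    rw [hbase]
    exact hsp
  · -- the other window lies inside the object
    have e : w = ⟨a, a + m⟩ := List.mem_singleton.mp hw
    subst e
    right
    refine ⟨⟨p, n, c, .live⟩, hlc, h1, ?_⟩
    show a + m ≤ p + c
    omega

/-- **`movsxd r15, ebp` of a small count**: the sign extension of a 32-bit value below `2 ^ 31` is the value. -/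
theorem mm2_sext_small (x : Word) (h : x.toNat ≤ 256) :
    (Word.ofBV (BitVec.signExtend 64 (Word.part .w32 x))).toNat = x.toNat := by
  have hp : (Word.part .w32 x).toNat = x.toNat := by
    rw [toNat_part32]
    omega
  have hm : (Word.part .w32 x).msb = false := by
    rw [BitVec.msb_eq_decide]
    simp only [decide_eq_false_iff_not, Width.bits]
    rw [hp]
    omega
  unfold Word.ofBV
  simp only [UInt64.toNat_ofBitVec, BitVec.toNat_setWidth, BitVec.toNat_signExtend, hm]
  rw [hp, if_neg Bool.false_ne_true]
  omega

/-- **What `Done` says of a successful call**, from the two fields read back: `rbx = b` is the `ColorMapObject` at `H.next`, its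
`Colors` field holds `a`, the array at `H.next + 96` (the next object of `H.push 24 32`); both are live in the final heap. -/
theorem mm2_done_res {H : Heap} {count : Nat} {mem : Mem} {a b : Word} (hb : b.toNat = H.next) (ha : a.toNat = H.next + 96)
    (hnx : H.next + 96 ≤ 0xC00000) (hcc : mem.readLE b 4 = count) (hco : mem.readLE (b + 16) 8 = a.toNat)
    (htwo : 2 ≤ count) (hc256 : count ≤ 256) :
    ∃ colors,
      ((H.push 24 (r16 24)).push (3 * count) (r16 (3 * count))).Live b.toNat 24 ∧
      ((H.push 24 (r16 24)).push (3 * count) (r16 (3 * count))).Live colors (3 * count) ∧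
      H.next ≤ b.toNat ∧ H.next ≤ colors ∧ colors ≠ b.toNat ∧
      ColorMapObject.ColorCount mem b.toNat = count ∧
      ColorMapObject.Colors mem b.toNat = colors ∧
      2 ≤ count ∧ count ≤ 256 := by
  have e32 : r16 24 = 32 := by decide
  have hn1 : (H.push 24 (r16 24)).next = H.next + 96 := by
    rw [mm2_next_push, e32]
  have hb16 : (b + 16).toNat = H.next + 16 := by u_omega
  refine ⟨H.next + 96, ?_, ?_, ?_, ?_, ?_, ?_, ?_, htwo, hc256⟩
  · rw [hb]
    exact (Heap.live_push H 24 (r16 24)).push (3 * count) (r16 (3 * count))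
  · rw [← hn1]
    exact Heap.live_push (H.push 24 (r16 24)) (3 * count) (r16 (3 * count))
  · omega
  · omega
  · omega
  · simp only [gfield]
    rw [hb, ← rd_eq_readLE mem b H.next 4 hb]
    exact hcc
  · simp only [gfield]
    rw [hb, ← rd_eq_readLE mem (b + 16) (H.next + 16) 8 hb16, hco]
    exact ha

/-! ### The assertions at the cut points -/

/-- **What holds at every state of segment 2 between the calls**: the body's stack pointer `RA − 56`; `rbx = Object = H.next`;
`ebp = r15 = count`; `r12d` = the result of GifBitSize; `r13 = ColorMap`; the six saved registers and the return address in their slots; the footprint so far;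
the text, DF and the MXCSR masks. -/
structure Mm2Body (H : Heap) (count : Nat) (u₀ e : State) (ret : Word) (v : State) : Prop where
  rsp : v.reg .rsp = e.reg .rsp - 56
  rbx : (v.reg .rbx).toNat = H.next
  rbp : (v.reg .rbp).toNat = count
  r12 : (v.reg .r12).toNat ≤ 9
  r13 : v.reg .r13 = e.reg .rsi
  /-- `movsxd r15, ebp` -/
  r15 : (v.reg .r15).toNat = count
  slot_r15 : v.mem.readLE (e.reg .rsp - 8) 8 = (e.reg .r15).toNat
  slot_r14 : v.mem.readLE (e.reg .rsp - 16) 8 = (e.reg .r14).toNat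
  slot_r13 : v.mem.readLE (e.reg .rsp - 24) 8 = (e.reg .r13).toNat
  slot_r12 : v.mem.readLE (e.reg .rsp - 32) 8 = (e.reg .r12).toNat
  slot_rbp : v.mem.readLE (e.reg .rsp - 40) 8 = (e.reg .rbp).toNat
  slot_rbx : v.mem.readLE (e.reg .rsp - 48) 8 = (e.reg .rbx).toNat
  slot_ra : UInt64.ofNat (v.mem.readLE (e.reg .rsp) 8) = ret
  same : Mem.SameExcept
    [⟨(e.reg .rsp).toNat - 160, (e.reg .rsp).toNat⟩,
     ⟨0x800000, 0x800008⟩,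
     ⟨H.next - 32, 0xC00000⟩,
     ⟨0xC00000 + (H.next - 32) / 8, 0xC00000 + (0xC00000 + 7) / 8⟩] e.mem v.mem
  code : Mem.EqOn ProgX.Base.L.textLo ProgX.Base.L.textHi u₀.mem v.mem
  df : v.flags .df = false
  mx : v.mxcsr &&& 0x1F80 = 0x1F80

/-- **At 0x10794b (ret3), `calloc(count, 3)` has returned** (l.58): BOTH outcomes of its contract over the heap with the
`ColorMapObject`, with the clean stack ending at the body's stack pointer. -/
structure Mm2Ret3 (H : Heap) (rest : List Obj) (frames : List (Nat × FrameLayout)) (count : Nat) (u₀ e : State) (ret : Word)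
    (v : State) : Prop where
  entry : AtEntry (conv u₀) Gif.L.GifMakeMapObject.entry (GifMakeMapObject.spec H rest frames count).frame ret e
  pre : (GifMakeMapObject.spec H rest frames count).pre e
  rip : v.rip = Gif.L.GifMakeMapObject.ret3
  body : Mm2Body H count u₀ e ret v
  two : 2 ≤ count
  /-- room: `rax = Colors`, the new object, live -/
  fits : (H.push 24 (r16 24)).Fits (r16 (3 * count)) →
    (v.reg .rax).toNat = (H.push 24 (r16 24)).next ∧
    HeapInv ((H.push 24 (r16 24)).push (3 * count) (r16 (3 * count))) rest frames ((e.reg .rsp).toNat - 56) v.mem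
  /-- no room: NULL, the heap as it was -/
  nofit : ¬ (H.push 24 (r16 24)).Fits (r16 (3 * count)) →
    v.reg .rax = 0 ∧ HeapInv (H.push 24 (r16 24)) rest frames ((e.reg .rsp).toNat - 56) v.mem

/-! ### Part 2: the walk -/

/-- **0x10793b … 0x107946, `call calloc`, 0x10794b (ret3)** (l.58 `calloc(ColorCount, 3)`). -/
theorem mm2_seg_calloc (Lay : Layout) (hLay : Lay.hi = 0x1000000) (μ : Microarch) (hμ : UserX.MicroOK μ) (u₀ : State)
    (hcode : HasCodeNat Lay u₀ Gif.L.GifMakeMapObject.entry Gif.Code.code_GifMakeMapObject.nat Gif.L.GifMakeMapObject.size)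
    (H : Heap) (rest : List Obj) (frames : List (Nat × FrameLayout)) (count : Nat) (e : State) (ret : Word)
    (h_calloc : Calls Lay μ ProgX.Base.WayInv (ProgX.Base.conv u₀) ProgX.Base.L.calloc.entry
      (ProgX.Base.Spec.calloc.spec (H.push 24 (r16 24)) rest frames))
    (v : State) (hat : GifMakeMapObject.AfterMalloc H rest frames count u₀ e ret v) :
    ReachVia Lay μ ProgX.Base.WayInv v (Mm2Ret3 H rest frames count u₀ e ret) := by
  have he := hat.entry
  v_entry he
  obtain ⟨hp, hcount, hc256, hsrc⟩ := hat.pre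
  have hbase := hp.base
  have hlimit := hp.limit
  have hbase' : (H.push 24 (r16 24)).base = 0x800000 := hbase
  have hlimit' : (H.push 24 (r16 24)).limit = 0xC00000 := hlimit
  have e32 : r16 24 = 32 := by decide
  -- where the object is: `H` had room for it
  have hfit0 : H.Fits (r16 24) := mm2_fits_of_push hat.inv.heap
  have hnx : 0x800040 ≤ H.next ∧ H.next + 64 ≤ 0xC00000 := by
    unfold Heap.Fits at hfit0
    rw [Heap.next_def, hbase]
    rw [hbase, hlimit] at hfit0
    omega
  have hn1 : (H.push 24 (r16 24)).next = H.next + 96 := by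
    rw [mm2_next_push, e32]
  -- the state at the cut, under the names the walker reads
  have w_rip := hat.rip
  have c_rsp : v.reg .rsp = e.reg .rsp - 56 := hat.rsp
  obtain ⟨b, c_rbx⟩ : ∃ b, v.reg .rbx = b := ⟨_, rfl⟩
  have hb : b.toNat = H.next := by
    rw [← c_rbx]
    exact hat.rbx
  obtain ⟨cw, c_rbp⟩ : ∃ cw, v.reg .rbp = cw := ⟨_, rfl⟩
  have hcw : cw.toNat = count := by
    rw [← c_rbp]
    exact hat.rbp
  have c_r13 : v.reg .r13 = e.reg .rsi := hat.r13
  have w_kept : RegsKept [.rsp] v v := RegsKept.refl _ _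
  have w_eq : Mem.EqOn ProgX.Base.L.textLo ProgX.Base.L.textHi u₀.mem v.mem := conv_code_eqOn hat.code
  have hdf : v.flags .df = false := (show abiInv _ from hat.abi).1
  have hmx : v.mxcsr &&& 0x1F80 = 0x1F80 := (show abiInv _ from hat.abi).2
  have hsse : SseOK v := ProgX.Base.sseOK_of_abiInv hat.abi
  have k_r15 : v.mem.readLE (e.reg .rsp - 8) 8 = (e.reg .r15).toNat := hat.slot_r15
  have k_r14 : v.mem.readLE (e.reg .rsp - 16) 8 = (e.reg .r14).toNat := hat.slot_r14
  have k_r13 : v.mem.readLE (e.reg .rsp - 24) 8 = (e.reg .r13).toNat := hat.slot_r13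
  have k_r12 : v.mem.readLE (e.reg .rsp - 32) 8 = (e.reg .r12).toNat := hat.slot_r12
  have k_rbp : v.mem.readLE (e.reg .rsp - 40) 8 = (e.reg .rbp).toNat := hat.slot_rbp
  have k_rbx : v.mem.readLE (e.reg .rsp - 48) 8 = (e.reg .rbx).toNat := hat.slot_rbx
  have k_ra : UInt64.ofNat (v.mem.readLE (e.reg .rsp) 8) = ret := hat.slot_ra
  have hsame := hat.same
  simp only [shadowSpan] at hsame
  have hinv := hat.inv
  have hcal := h_calloc
  u_walk hcode [hμ.vendor] until [Gif.L.GifMakeMapObject.ret3] span [ProgX.Base.L.textLo, ProgX.Base.L.textHi] side (v_side)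
  case call_inv =>
    v_inv
  case pre_107946 =>
    -- calloc's precondition: the heap's invariant (with the new object) over the pushed return address
    have e_rsp : (s_107946.reg .rsp).toNat + 8 = (e.reg .rsp).toNat - 56 := by
      rw [w_rsp]
      u_omega
    refine ⟨?_, hbase', hlimit', hp.text, hp.offText⟩
    rw [e_rsp, w_mem]
    exact hinv.writeLE_out _ _ _ (by u_omega) (by rw [hbase']; left; u_omega) (by left; u_omega)
  -- 0x10794b (ret3): calloc has returned
  have erdi : (s_107946.reg .rdi).toNat = count := by
    rw [w_rdi_107946, mm2_sext_small cw (by omega)]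
    exact hcw
  have ersi : (s_107946.reg .rsi).toNat = 3 := by
    rw [w_rsi_107946]
    rfl
  obtain ⟨hpost, hzero⟩ := w_post
  rw [erdi, ersi, Nat.mul_comm count 3] at hpost
  clear hzero
  have e8 : (s_107946.reg .rsp).toNat + 8 = (e.reg .rsp).toNat - 56 := by
    rw [w_rsp_107946]
    u_omega
  v_after_call w_rsp_107946 w_mem_107946
  simp only [shadowSpan, erdi, ersi, hn1] at w_same
  -- the six saved registers, through calloc's footprint
  -- (`rsp % 8 = 0` is no longer needed, and with it `omega` fails on "a stack slot misses calloc's shadow window")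
  clear he_align
  have hp15 : s_107946.mem.readLE (e.reg .rsp - 8) 8 = (e.reg .r15).toNat := by u_resolve
  rw [w_mem_107946] at hp15
  have hs15 : s_107946r.mem.readLE (e.reg .rsp - 8) 8 = (e.reg .r15).toNat := by u_frame hp15
  have hp14 : s_107946.mem.readLE (e.reg .rsp - 16) 8 = (e.reg .r14).toNat := by u_resolve
  rw [w_mem_107946] at hp14
  have hs14 : s_107946r.mem.readLE (e.reg .rsp - 16) 8 = (e.reg .r14).toNat := by u_frame hp14
  have hp13 : s_107946.mem.readLE (e.reg .rsp - 24) 8 = (e.reg .r13).toNat := by u_resolve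
  rw [w_mem_107946] at hp13
  have hs13 : s_107946r.mem.readLE (e.reg .rsp - 24) 8 = (e.reg .r13).toNat := by u_frame hp13
  have hp12 : s_107946.mem.readLE (e.reg .rsp - 32) 8 = (e.reg .r12).toNat := by u_resolve
  rw [w_mem_107946] at hp12
  have hs12 : s_107946r.mem.readLE (e.reg .rsp - 32) 8 = (e.reg .r12).toNat := by u_frame hp12
  have hpbp : s_107946.mem.readLE (e.reg .rsp - 40) 8 = (e.reg .rbp).toNat := by u_resolve
  rw [w_mem_107946] at hpbp
  have hsbp : s_107946r.mem.readLE (e.reg .rsp - 40) 8 = (e.reg .rbp).toNat := by u_frame hpbp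
  have hpbx : s_107946.mem.readLE (e.reg .rsp - 48) 8 = (e.reg .rbx).toNat := by u_resolve
  rw [w_mem_107946] at hpbx
  have hsbx : s_107946r.mem.readLE (e.reg .rsp - 48) 8 = (e.reg .rbx).toNat := by u_frame hpbx
  have hpra : UInt64.ofNat (s_107946.mem.readLE (e.reg .rsp) 8) = ret := by
    rw [w_mem_107946]
    u_frame k_ra
  rw [w_mem_107946] at hpra
  have hsra : UInt64.ofNat (s_107946r.mem.readLE (e.reg .rsp) 8) = ret := by u_frame hpra
  -- the footprint so far: calloc's windows lie inside the contract's when there was room; otherwise only stack was written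
  have hsameR : Mem.SameExcept
      [⟨(e.reg .rsp).toNat - 160, (e.reg .rsp).toNat⟩,
       ⟨0x800000, 0x800008⟩,
       ⟨H.next - 32, 0xC00000⟩,
       ⟨0xC00000 + (H.next - 32) / 8, 0xC00000 + (0xC00000 + 7) / 8⟩] e.mem s_107946r.mem := by
    by_cases hfit : (H.push 24 (r16 24)).Fits (r16 (3 * count))
    · have hr := hinv.heap.next_range hfit
      rw [hn1] at hr
      have hle := le_r16 (3 * count)
      u_same
    · obtain ⟨_, _, _, hstack⟩ := hpost.2 hfit
      clear w_same
      have w_same := hstack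
      rw [w_rsp_107946, w_mem_107946] at w_same
      u_same
  refine ReachVia.done ⟨hat.entry, hat.pre, w_rip, ⟨w_rsp, ?_, ?_, ?_, ?_, ?_, hs15, hs14, hs13, hs12, hsbp, hsbx, hsra, hsameR, w_eq, w_df, w_mx⟩,
    hat.two, ?_, ?_⟩
  · rw [w_kept.get .rbx rfl, c_rbx]
    exact hb
  · rw [w_kept.get .rbp rfl, c_rbp]
    exact hcw
  · rw [w_kept.get .r12 rfl]
    exact hat.r12
  · rw [w_kept.get .r13 rfl]
    exact c_r13
  · rw [w_r15, mm2_sext_small cw (by omega)]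
    exact hcw
  · -- room: the new object
    intro hf
    obtain ⟨k1, k2⟩ := hpost.1 hf
    rw [e8] at k2
    exact ⟨k1, k2⟩
  · -- no room: NULL
    intro hnf
    obtain ⟨k1, k2, _, _⟩ := hpost.2 hnf
    rw [e8] at k2
    exact ⟨k1, k2⟩

/-- **0x10794b … 0x10799d, `call free`, 0x1079a2 … 0x1079ac: `calloc` failed** (l.57-61): `r14 = 0`; the checked store
`Object->Colors = NULL` into the new `ColorMapObject` (live: `Heap.live_push`); `je` taken; `free(Object)`: the heap is
`(H.push 24 32).release H.next`, grown from `H` (`Heap.Grew.release_new`); `rbx = r14 = 0`; the join. -/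
theorem mm2_seg_fail (Lay : Layout) (hLay : Lay.hi = 0x1000000) (μ : Microarch) (hμ : UserX.MicroOK μ) (u₀ : State)
    (hcode : HasCodeNat Lay u₀ Gif.L.GifMakeMapObject.entry Gif.Code.code_GifMakeMapObject.nat Gif.L.GifMakeMapObject.size)
    (H : Heap) (rest : List Obj) (frames : List (Nat × FrameLayout)) (count : Nat) (e : State) (ret : Word)
    (h_free : Calls Lay μ ProgX.Base.WayInv (ProgX.Base.conv u₀) ProgX.Base.L.free.entry
      (ProgX.Base.Spec.free.spec (H.push 24 (r16 24)) rest frames 24))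
    (h_asan_store8_noabort : Asan.SmallCheck Lay μ ProgX.Base.WayInv (ProgX.Base.CodeOK u₀) [.rax, .rcx, .rdx] 8
      ProgX.Base.L.__asan_store8_noabort.entry)
    (v : State) (hat : Mm2Ret3 H rest frames count u₀ e ret v)
    (hnf : ¬ (H.push 24 (r16 24)).Fits (r16 (3 * count))) :
    ReachVia Lay μ ProgX.Base.WayInv v
      (GifMakeMapObject.Done H rest frames count ((H.push 24 (r16 24)).release H.next) u₀ e ret) := by
  have he := hat.entry
  v_entry he
  obtain ⟨hp, hcount, hc256, hsrc⟩ := hat.pre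
  obtain ⟨c_rax, hinv⟩ := hat.nofit hnf
  have hbody := hat.body
  have hbase := hp.base
  have hlimit := hp.limit
  have hbase' : (H.push 24 (r16 24)).base = 0x800000 := hbase
  have hlimit' : (H.push 24 (r16 24)).limit = 0xC00000 := hlimit
  have e32 : r16 24 = 32 := by decide
  -- where the object is: `H` had room for it
  have hfit0 : H.Fits (r16 24) := mm2_fits_of_push hinv.heap
  have hnx : 0x800040 ≤ H.next ∧ H.next + 64 ≤ 0xC00000 := by
    unfold Heap.Fits at hfit0
    rw [Heap.next_def, hbase]
    rw [hbase, hlimit] at hfit0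
    omega
  have hused : (H.push 24 (r16 24)).base + 32 + (H.push 24 (r16 24)).used = H.next + 64 := by
    rw [Heap.push_base, Heap.push_used, Heap.next_def, e32]
    omega
  -- the `ColorMapObject` is live
  have hlive : (H.push 24 (r16 24)).Live H.next 24 := Heap.live_push H 24 (r16 24)
  -- the state at the cut, under the names the walker reads
  have w_rip := hat.rip
  have c_rsp : v.reg .rsp = e.reg .rsp - 56 := hbody.rsp
  obtain ⟨b, c_rbx⟩ : ∃ b, v.reg .rbx = b := ⟨_, rfl⟩
  have hb : b.toNat = H.next := by
    rw [← c_rbx]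
    exact hbody.rbx
  have w_kept : RegsKept [.rsp] v v := RegsKept.refl _ _
  have w_eq : Mem.EqOn ProgX.Base.L.textLo ProgX.Base.L.textHi u₀.mem v.mem := hbody.code
  have hdf : v.flags .df = false := hbody.df
  have hmx : v.mxcsr &&& 0x1F80 = 0x1F80 := hbody.mx
  have hsse : SseOK v := ProgX.Base.sseOK_of_abiInv ⟨hdf, hmx⟩
  have k_r15 : v.mem.readLE (e.reg .rsp - 8) 8 = (e.reg .r15).toNat := hbody.slot_r15
  have k_r14 : v.mem.readLE (e.reg .rsp - 16) 8 = (e.reg .r14).toNat := hbody.slot_r14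
  have k_r13 : v.mem.readLE (e.reg .rsp - 24) 8 = (e.reg .r13).toNat := hbody.slot_r13
  have k_r12 : v.mem.readLE (e.reg .rsp - 32) 8 = (e.reg .r12).toNat := hbody.slot_r12
  have k_rbp : v.mem.readLE (e.reg .rsp - 40) 8 = (e.reg .rbp).toNat := hbody.slot_rbp
  have k_rbx : v.mem.readLE (e.reg .rsp - 48) 8 = (e.reg .rbx).toNat := hbody.slot_rbx
  have k_ra : UInt64.ofNat (v.mem.readLE (e.reg .rsp) 8) = ret := hbody.slot_ra
  have hsame := hbody.same
  have hfree := h_free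
  u_walk hcode [hμ.vendor] until [Gif.L.GifMakeMapObject.at_1079ac] span [ProgX.Base.L.textLo, ProgX.Base.L.textHi] side (v_side)
  case check_107952 =>
    -- l.57: `Object->Colors`, 8 bytes at offset 16 of the new object
    have hun : ShadowUntouched v.mem s_107952.mem := by v_untouched
    have hl : LiveIn ((H.push 24 (r16 24)).liveObjs ++ rest) frames H.next 24 :=
      hlive.liveIn rest frames (Nat.le_refl _) (Nat.le_refl _)
    exact hl.accSmall hinv.shadow hun _ 8 (by decide) (by u_omega) (by u_omega)
  case call_inv =>
    v_inv
  case pre_10799d =>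
    -- free's precondition: the heap's invariant over the store into the live object and the pushed return addresses; `Object` is live
    have e_rsp : (s_10799d.reg .rsp).toNat + 8 = (e.reg .rsp).toNat - 56 := by
      rw [w_rsp]
      u_omega
    refine ⟨⟨?_, hbase', hlimit', hp.text, hp.offText⟩, Or.inr ?_⟩
    · rw [e_rsp, w_mem]
      have h1 := hinv.writeLE_out (e.reg .rsp - 64) 8 1079639 (by u_omega) (by rw [hbase']; left; u_omega) (by left; u_omega)
      have h2 := h1.writeLE_live hlive (b + 16) 8 0 (by u_omega) (by u_omega)
      exact h2.writeLE_out _ _ _ (by u_omega) (by rw [hbase']; left; u_omega) (by left; u_omega)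
    · rw [w_rdi, hb]
      exact hlive
  -- 0x1079a2 (ret9): free has returned
  have hne : (s_10799d.reg .rdi).toNat ≠ 0 := by
    rw [w_rdi_10799d, hb]
    omega
  have k3 := w_post.2 hne
  rw [w_rdi_10799d, hb] at k3
  clear w_post
  have e8 : (s_10799d.reg .rsp).toNat + 8 = (e.reg .rsp).toNat - 56 := by
    rw [w_rsp_10799d]
    u_omega
  rw [e8] at k3
  v_after_call w_rsp_10799d w_mem_10799d
  simp only [shadowSpan, w_rdi_10799d, hb] at w_same
  -- (`rsp % 8 = 0` is no longer needed, and with it `omega` fails on "a stack slot misses free's shadow window")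
  clear he_align
  have hp15 : s_10799d.mem.readLE (e.reg .rsp - 8) 8 = (e.reg .r15).toNat := by u_resolve
  rw [w_mem_10799d] at hp15
  have hs15 : s_10799dr.mem.readLE (e.reg .rsp - 8) 8 = (e.reg .r15).toNat := by u_frame hp15
  have hp14 : s_10799d.mem.readLE (e.reg .rsp - 16) 8 = (e.reg .r14).toNat := by u_resolve
  rw [w_mem_10799d] at hp14
  have hs14 : s_10799dr.mem.readLE (e.reg .rsp - 16) 8 = (e.reg .r14).toNat := by u_frame hp14
  have hp13 : s_10799d.mem.readLE (e.reg .rsp - 24) 8 = (e.reg .r13).toNat := by u_resolve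
  rw [w_mem_10799d] at hp13
  have hs13 : s_10799dr.mem.readLE (e.reg .rsp - 24) 8 = (e.reg .r13).toNat := by u_frame hp13
  have hp12 : s_10799d.mem.readLE (e.reg .rsp - 32) 8 = (e.reg .r12).toNat := by u_resolve
  rw [w_mem_10799d] at hp12
  have hs12 : s_10799dr.mem.readLE (e.reg .rsp - 32) 8 = (e.reg .r12).toNat := by u_frame hp12
  have hpbp : s_10799d.mem.readLE (e.reg .rsp - 40) 8 = (e.reg .rbp).toNat := by u_resolve
  rw [w_mem_10799d] at hpbp
  have hsbp : s_10799dr.mem.readLE (e.reg .rsp - 40) 8 = (e.reg .rbp).toNat := by u_frame hpbp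
  have hpbx : s_10799d.mem.readLE (e.reg .rsp - 48) 8 = (e.reg .rbx).toNat := by u_resolve
  rw [w_mem_10799d] at hpbx
  have hsbx : s_10799dr.mem.readLE (e.reg .rsp - 48) 8 = (e.reg .rbx).toNat := by u_frame hpbx
  have hpra : UInt64.ofNat (s_10799d.mem.readLE (e.reg .rsp) 8) = ret := by
    rw [w_mem_10799d]
    u_frame k_ra
  rw [w_mem_10799d] at hpra
  have hsra : UInt64.ofNat (s_10799dr.mem.readLE (e.reg .rsp) 8) = ret := by u_frame hpra
  have hsameR : Mem.SameExcept
      [⟨(e.reg .rsp).toNat - 160, (e.reg .rsp).toNat⟩,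
       ⟨0x800000, 0x800008⟩,
       ⟨H.next - 32, 0xC00000⟩,
       ⟨0xC00000 + (H.next - 32) / 8, 0xC00000 + (0xC00000 + 7) / 8⟩] e.mem s_10799dr.mem := by
    u_same
  -- 0x1079a2 … 0x1079ac: `rbx = r14 = 0`, the join
  u_walk hcode [hμ.vendor] until [Gif.L.GifMakeMapObject.at_1079ac] span [ProgX.Base.L.textLo, ProgX.Base.L.textHi] side (v_side)
  have hgrew : H.Grew ((H.push 24 (r16 24)).release H.next) :=
    Heap.Grew.release_new (Heap.Grew.push H 24 (r16 24)) hp.inv.heap (Nat.le_refl _)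
  refine ReachVia.done ⟨hat.entry, hat.pre, w_rip, w_rsp, ?_, ?_, ?_, ?_, ?_, ?_, ?_, hgrew, ?_, Or.inl ?_, ?_, conv_code_in w_eq, ?_⟩
  · rw [w_mem]
    exact hs15
  · rw [w_mem]
    exact hs14
  · rw [w_mem]
    exact hs13
  · rw [w_mem]
    exact hs12
  · rw [w_mem]
    exact hsbp
  · rw [w_mem]
    exact hsbx
  · rw [w_mem]
    exact hsra
  · rw [w_mem]
    exact k3
  · rw [w_rbx]
    rfl
  · simp only [shadowSpan]
    rw [w_mem]
    exact hsameR
  · v_inv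

/-- **0x10794b … 0x107993, `call memcpy`, 0x107998 … 0x1079ac: `calloc` succeeded** (l.57, 64-70): `r14 = Colors`, the new object
of the heap `(H.push 24 32).push (3 · count) …`; the four checked stores into the `ColorMapObject` (live: `Heap.live_push`, kept by
the second allocation: `Heap.Live.push`); `ColorMap == NULL`: the join; otherwise `memcpy(Colors, ColorMap, 3 · count)`: the source
is live as at the entry (`LiveIn.heap_push` twice), the destination is the newest object, which lies above every object of `H`
(`mm2_live_below_next`: no harmful overlap). -/
theorem mm2_seg_fill (Lay : Layout) (hLay : Lay.hi = 0x1000000) (μ : Microarch) (hμ : UserX.MicroOK μ) (u₀ : State)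
    (hcode : HasCodeNat Lay u₀ Gif.L.GifMakeMapObject.entry Gif.Code.code_GifMakeMapObject.nat Gif.L.GifMakeMapObject.size)
    (H : Heap) (rest : List Obj) (frames : List (Nat × FrameLayout)) (count : Nat) (e : State) (ret : Word)
    (h_memcpy : Calls Lay μ ProgX.Base.WayInv (ProgX.Base.conv u₀) ProgX.Base.L.memcpy.entry
      (ProgX.Base.Spec.memcpy.spec (((H.push 24 (r16 24)).push (3 * count) (r16 (3 * count))).liveObjs ++ rest) frames))
    (h_asan_store8_noabort : Asan.SmallCheck Lay μ ProgX.Base.WayInv (ProgX.Base.CodeOK u₀) [.rax, .rcx, .rdx] 8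
      ProgX.Base.L.__asan_store8_noabort.entry)
    (h_asan_store4_noabort : Asan.SmallCheck Lay μ ProgX.Base.WayInv (ProgX.Base.CodeOK u₀) [.rax, .rcx, .rdx] 4
      ProgX.Base.L.__asan_store4_noabort.entry)
    (h_asan_store1_noabort : Asan.SmallCheck Lay μ ProgX.Base.WayInv (ProgX.Base.CodeOK u₀) [.rax, .rdx] 1
      ProgX.Base.L.__asan_store1_noabort.entry)
    (v : State) (hat : Mm2Ret3 H rest frames count u₀ e ret v)
    (hf : (H.push 24 (r16 24)).Fits (r16 (3 * count))) :
    ReachVia Lay μ ProgX.Base.WayInv v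
      (GifMakeMapObject.Done H rest frames count ((H.push 24 (r16 24)).push (3 * count) (r16 (3 * count))) u₀ e ret) := by
  have he := hat.entry
  v_entry he
  obtain ⟨hp, hcount, hc256, hsrc⟩ := hat.pre
  obtain ⟨hrax, hinv⟩ := hat.fits hf
  have htwo := hat.two
  have hbody := hat.body
  have hbase := hp.base
  have hlimit := hp.limit
  have hbase2 : ((H.push 24 (r16 24)).push (3 * count) (r16 (3 * count))).base = 0x800000 := hbase
  have hlimit2 : ((H.push 24 (r16 24)).push (3 * count) (r16 (3 * count))).limit = 0xC00000 := hlimit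
  have e32 : r16 24 = 32 := by decide
  have hn1 : (H.push 24 (r16 24)).next = H.next + 96 := by
    rw [mm2_next_push, e32]
  -- where the two objects are
  have hnx : 0x800040 ≤ H.next := by
    rw [Heap.next_def, hbase]
    omega
  have hend := mm2_fits_next hf
  rw [hn1] at hend
  have hlimit1 : (H.push 24 (r16 24)).limit = 0xC00000 := hlimit
  rw [hlimit1] at hend
  have hle := le_r16 (3 * count)
  -- the two objects are live
  have hlive1 : ((H.push 24 (r16 24)).push (3 * count) (r16 (3 * count))).Live H.next 24 :=
    (Heap.live_push H 24 (r16 24)).push (3 * count) (r16 (3 * count))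
  have hlive2 : ((H.push 24 (r16 24)).push (3 * count) (r16 (3 * count))).Live (H.next + 96) (3 * count) := by
    rw [← hn1]
    exact Heap.live_push (H.push 24 (r16 24)) (3 * count) (r16 (3 * count))
  have hl1 : LiveIn (((H.push 24 (r16 24)).push (3 * count) (r16 (3 * count))).liveObjs ++ rest) frames H.next 24 :=
    hlive1.liveIn rest frames (Nat.le_refl _) (Nat.le_refl _)
  -- the state at the cut, under the names the walker reads
  have w_rip := hat.rip
  have c_rsp : v.reg .rsp = e.reg .rsp - 56 := hbody.rsp
  obtain ⟨a, c_rax⟩ : ∃ a, v.reg .rax = a := ⟨_, rfl⟩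
  have ha : a.toNat = H.next + 96 := by
    rw [← c_rax, hrax]
    exact hn1
  obtain ⟨b, c_rbx⟩ : ∃ b, v.reg .rbx = b := ⟨_, rfl⟩
  have hb : b.toNat = H.next := by
    rw [← c_rbx]
    exact hbody.rbx
  obtain ⟨cw, c_rbp⟩ : ∃ cw, v.reg .rbp = cw := ⟨_, rfl⟩
  have hcw : cw.toNat = count := by
    rw [← c_rbp]
    exact hbody.rbp
  obtain ⟨cn, c_r15⟩ : ∃ cn, v.reg .r15 = cn := ⟨_, rfl⟩
  have hcn : cn.toNat = count := by
    rw [← c_r15]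
    exact hbody.r15
  obtain ⟨bp, c_r12⟩ : ∃ bp, v.reg .r12 = bp := ⟨_, rfl⟩
  have c_r13 : v.reg .r13 = e.reg .rsi := hbody.r13
  have w_kept : RegsKept [.rsp] v v := RegsKept.refl _ _
  have w_eq : Mem.EqOn ProgX.Base.L.textLo ProgX.Base.L.textHi u₀.mem v.mem := hbody.code
  have hdf : v.flags .df = false := hbody.df
  have hmx : v.mxcsr &&& 0x1F80 = 0x1F80 := hbody.mx
  have hsse : SseOK v := ProgX.Base.sseOK_of_abiInv ⟨hdf, hmx⟩
  have k_r15 : v.mem.readLE (e.reg .rsp - 8) 8 = (e.reg .r15).toNat := hbody.slot_r15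
  have k_r14 : v.mem.readLE (e.reg .rsp - 16) 8 = (e.reg .r14).toNat := hbody.slot_r14
  have k_r13 : v.mem.readLE (e.reg .rsp - 24) 8 = (e.reg .r13).toNat := hbody.slot_r13
  have k_r12 : v.mem.readLE (e.reg .rsp - 32) 8 = (e.reg .r12).toNat := hbody.slot_r12
  have k_rbp : v.mem.readLE (e.reg .rsp - 40) 8 = (e.reg .rbp).toNat := hbody.slot_rbp
  have k_rbx : v.mem.readLE (e.reg .rsp - 48) 8 = (e.reg .rbx).toNat := hbody.slot_rbx
  have k_ra : UInt64.ofNat (v.mem.readLE (e.reg .rsp) 8) = ret := hbody.slot_ra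
  have hsame := hbody.same
  have hcpy := h_memcpy
  -- the stores of this segment (four fields of the live `ColorMapObject`, the return addresses pushed below the body's stack
  -- pointer) keep the heap's invariant
  have hkeep : ∀ m' : Mem, ShadowUntouched v.mem m' →
      Mem.SameExcept [⟨(e.reg .rsp).toNat - 56 - 8, (e.reg .rsp).toNat - 56⟩, ⟨H.next, H.next + 24⟩] v.mem m' →
      HeapInv ((H.push 24 (r16 24)).push (3 * count) (r16 (3 * count))) rest frames ((e.reg .rsp).toNat - 56) m' := by
    intro m' hun hs
    exact mm2_callee_into_live hinv hbase2 hun (by omega) hlive1 (Nat.le_refl _) (Nat.le_refl _) hs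
  have hcw32 : (Word.part .w32 cw).toNat = count := by
    rw [toNat_part32, hcw]
    omega
  u_walk hcode [hμ.vendor] until [Gif.L.GifMakeMapObject.at_1079ac] span [ProgX.Base.L.textLo, ProgX.Base.L.textHi] side (v_side)
  case check_107952 =>
    have hun : ShadowUntouched v.mem s_107952.mem := by v_untouched
    exact hl1.accSmall hinv.shadow hun _ 8 (by decide) (by u_omega) (by u_omega)
  case check_107963 =>
    have hun : ShadowUntouched v.mem s_107963.mem := by v_untouched
    exact hl1.accSmall hinv.shadow hun _ 4 (by decide) (by u_omega) (by u_omega)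
  case check_10796e =>
    have hun : ShadowUntouched v.mem s_10796e.mem := by v_untouched
    exact hl1.accSmall hinv.shadow hun _ 4 (by decide) (by u_omega) (by u_omega)
  case check_10797b =>
    have hun : ShadowUntouched v.mem s_10797b.mem := by v_untouched
    exact hl1.accSmall hinv.shadow hun _ 1 (by decide) (by u_omega) (by u_omega)
  case call_inv =>
    v_inv
  case pre_107993 =>
    -- memcpy's precondition, over the heap with the two new objects
    have hun : ShadowUntouched v.mem s_107993.mem := by v_untouched
    have hs : Mem.SameExcept [⟨(e.reg .rsp).toNat - 56 - 8, (e.reg .rsp).toNat - 56⟩, ⟨H.next, H.next + 24⟩]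
        v.mem s_107993.mem := by u_same
    have hinvS := hkeep _ hun hs
    have e_rsp : (s_107993.reg .rsp).toNat + 8 = (e.reg .rsp).toNat - 56 := by
      rw [w_rsp]
      u_omega
    rw [← e_rsp] at hinvS
    have hpS : HeapPre ((H.push 24 (r16 24)).push (3 * count) (r16 (3 * count))) rest frames s_107993 :=
      ⟨hinvS, hbase2, hlimit2, hp.text, hp.offText⟩
    have erdx : (s_107993.reg .rdx).toNat = 3 * count := by
      rw [w_rdx]
      u_omega
    have hlive : LiveIn (H.liveObjs ++ rest) frames (e.reg .rsi).toNat (3 * count) := by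
      rcases hsrc with h0 | hl
      · exact absurd h0 hbr_107987
      · exact hl
    refine ⟨hpS.shadowPre, Or.inr ?_⟩
    rw [erdx, w_rsi, w_rdi, ha]
    refine ⟨(hlive.heap_push 24 (r16 24)).heap_push (3 * count) (r16 (3 * count)),
      hlive2.liveIn rest frames (Nat.le_refl _) (Nat.le_refl _), ?_⟩
    -- no harmful overlap: the source was live before the two allocations
    have hap := mm2_live_below_next hlive hp.inv
    rw [hlimit] at hap
    omega
  case cont =>
    -- l.68: `ColorMap == NULL`: 0x1079ac (cut 2) with the map
    have hun : ShadowUntouched v.mem s_107987.mem := by v_untouched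
    have hs : Mem.SameExcept [⟨(e.reg .rsp).toNat - 56 - 8, (e.reg .rsp).toNat - 56⟩, ⟨H.next, H.next + 24⟩]
        v.mem s_107987.mem := by u_same
    have hinvS := hkeep _ hun hs
    have hcc : s_107987.mem.readLE b 4 = count := by
      rw [← hcw32]
      u_resolve
      rw [hcw32]
      omega
    have hco : s_107987.mem.readLE (b + 16) 8 = a.toNat := by u_resolve
    have erbx : s_107987.reg .rbx = b := (w_kept.get .rbx rfl).trans c_rbx
    -- (from here on the memory is known by its footprint `hs` only: the slots are read through two windows, not nine stores)
    clear w_mem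
    refine ReachVia.done ⟨hat.entry, hat.pre, w_rip, w_rsp, ?_, ?_, ?_, ?_, ?_, ?_, ?_,
      (Heap.Grew.push H 24 (r16 24)).trans (Heap.Grew.push _ _ _), hinvS, Or.inr ?_, ?_, conv_code_in w_eq, ?_⟩
    · u_frame k_r15
    · u_frame k_r14
    · u_frame k_r13
    · u_frame k_r12
    · u_frame k_rbp
    · u_frame k_rbx
    · u_frame k_ra
    · rw [erbx]
      exact mm2_done_res hb ha (by omega) hcc hco htwo hc256
    · simp only [shadowSpan]
      u_same
    · v_inv
  -- 0x107998 (ret8): memcpy has returned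
  obtain ⟨_, hunc, _⟩ := w_post
  have erdi : (s_107993.reg .rdi).toNat = H.next + 96 := by
    rw [w_rdi_107993]
    exact ha
  have erdx : (s_107993.reg .rdx).toNat = 3 * count := by
    rw [w_rdx_107993]
    u_omega
  have hun0 : ShadowUntouched v.mem s_107993.mem := by v_untouched
  have hs0 : Mem.SameExcept [⟨(e.reg .rsp).toNat - 56 - 8, (e.reg .rsp).toNat - 56⟩, ⟨H.next, H.next + 24⟩]
      v.mem s_107993.mem := by u_same
  have hinvS := hkeep _ hun0 hs0
  have hpcc : s_107993.mem.readLE b 4 = count := by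
    rw [← hcw32]
    u_resolve
    rw [hcw32]
    omega
  have hpco : s_107993.mem.readLE (b + 16) 8 = a.toNat := by u_resolve
  -- (from here on the memory at memcpy's entry is known by its footprint `hs0` only: two windows, not nine stores)
  clear w_mem_107993
  -- what `v_after_call` does, without writing the nest of stores into `w_same`
  have w_eq := ProgX.Base.conv_code_eqOn w_code
  have w_df := (show X86.User.abiInv _ from w_inv).1
  have w_mx := (show X86.User.abiInv _ from w_inv).2
  have w_sse := ProgX.Base.sseOK_of_abiInv w_inv
  simp only [X86.User.Spec.footprint, vspec] at w_same
  have hinvR : HeapInv ((H.push 24 (r16 24)).push (3 * count) (r16 (3 * count))) rest frames ((e.reg .rsp).toNat - 56)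
      s_107993r.mem := by
    refine mm2_callee_into_live hinvS hbase2 hunc ?_ hlive2 ?_ ?_ w_same
    · rw [w_rsp_107993]
      u_omega
    · omega
    · omega
  simp only [w_rsp_107993, erdi, erdx] at w_same
  have hp15 : s_107993.mem.readLE (e.reg .rsp - 8) 8 = (e.reg .r15).toNat := by u_frame k_r15
  have hs15 : s_107993r.mem.readLE (e.reg .rsp - 8) 8 = (e.reg .r15).toNat := by u_frame hp15
  have hp14 : s_107993.mem.readLE (e.reg .rsp - 16) 8 = (e.reg .r14).toNat := by u_frame k_r14
  have hs14 : s_107993r.mem.readLE (e.reg .rsp - 16) 8 = (e.reg .r14).toNat := by u_frame hp14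
  have hp13 : s_107993.mem.readLE (e.reg .rsp - 24) 8 = (e.reg .r13).toNat := by u_frame k_r13
  have hs13 : s_107993r.mem.readLE (e.reg .rsp - 24) 8 = (e.reg .r13).toNat := by u_frame hp13
  have hp12 : s_107993.mem.readLE (e.reg .rsp - 32) 8 = (e.reg .r12).toNat := by u_frame k_r12
  have hs12 : s_107993r.mem.readLE (e.reg .rsp - 32) 8 = (e.reg .r12).toNat := by u_frame hp12
  have hpbp : s_107993.mem.readLE (e.reg .rsp - 40) 8 = (e.reg .rbp).toNat := by u_frame k_rbp
  have hsbp : s_107993r.mem.readLE (e.reg .rsp - 40) 8 = (e.reg .rbp).toNat := by u_frame hpbp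
  have hpbx : s_107993.mem.readLE (e.reg .rsp - 48) 8 = (e.reg .rbx).toNat := by u_frame k_rbx
  have hsbx : s_107993r.mem.readLE (e.reg .rsp - 48) 8 = (e.reg .rbx).toNat := by u_frame hpbx
  have hpra : UInt64.ofNat (s_107993.mem.readLE (e.reg .rsp) 8) = ret := by u_frame k_ra
  have hsra : UInt64.ofNat (s_107993r.mem.readLE (e.reg .rsp) 8) = ret := by u_frame hpra
  have hcc : s_107993r.mem.readLE b 4 = count := by u_frame hpcc
  have hco : s_107993r.mem.readLE (b + 16) 8 = a.toNat := by u_frame hpco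
  have hsameR : Mem.SameExcept
      [⟨(e.reg .rsp).toNat - 160, (e.reg .rsp).toNat⟩,
       ⟨0x800000, 0x800008⟩,
       ⟨H.next - 32, 0xC00000⟩,
       ⟨0xC00000 + (H.next - 32) / 8, 0xC00000 + (0xC00000 + 7) / 8⟩] e.mem s_107993r.mem := by
    u_same
  -- 0x107998: `jmp` to the join
  u_walk hcode [hμ.vendor] until [Gif.L.GifMakeMapObject.at_1079ac] span [ProgX.Base.L.textLo, ProgX.Base.L.textHi] side (v_side)
  have erbx : s_107998.reg .rbx = b := (w_kept.get .rbx rfl).trans c_rbx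
  refine ReachVia.done ⟨hat.entry, hat.pre, w_rip, w_rsp, ?_, ?_, ?_, ?_, ?_, ?_, ?_,
    (Heap.Grew.push H 24 (r16 24)).trans (Heap.Grew.push _ _ _), ?_, Or.inr ?_, ?_, conv_code_in w_eq, ?_⟩
  · rw [w_mem]
    exact hs15
  · rw [w_mem]
    exact hs14
  · rw [w_mem]
    exact hs13
  · rw [w_mem]
    exact hs12
  · rw [w_mem]
    exact hsbp
  · rw [w_mem]
    exact hsbx
  · rw [w_mem]
    exact hsra
  · rw [w_mem]
    exact hinvR
  · rw [erbx, w_mem]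
    exact mm2_done_res hb ha (by omega) hcc hco htwo hc256
  · simp only [shadowSpan]
    rw [w_mem]
    exact hsameR
  · v_inv

end Gif.Spec.GifMakeMapObject_2
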